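-- pv_equiv track=rewrite | github.com/adinashby-vanier-college/programming-in-science-assignment-2-Tomassimo | Assignment2.py | max_two_in_list
-- ===== SOURCE A (Python) =====
-- def max_two_in_list(numbers):
--
--     if not numbers:
--         return (None, None)
--
--     if len(numbers) == 1:
--         return (numbers[0], None)
--
--     max1 = numbers[0]
--     max2 = None
--
--     for x in numbers[1:]:
--         if x > max1:
--             max2 = max1
--             max1 = x
--         elif x != max1 and (max2 is None or x > max2):
--             max2 = x
--
--     return (max1, max2)
-- ===== SOURCE B (Python) =====
-- def max_two_in_list(numbers):
--     if not numbers: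
--         return (None, None)
--     if len(numbers) == 1:
--         return (numbers[0], None)
--     m1 = max(numbers)
--     smaller = [x for x in numbers if x < m1]
--     return (m1, max(smaller) if smaller else None)
-- ===== Notes on version B (the rewrite author's own statement) =====
-- stated objective: simpler
-- what changed: Replaces the single-pass running max1/max2 state machine with two builtin passes: m1 = max(numbers), then the max of the elements strictly below m1 (or None if there are none).
import Mathlib
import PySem

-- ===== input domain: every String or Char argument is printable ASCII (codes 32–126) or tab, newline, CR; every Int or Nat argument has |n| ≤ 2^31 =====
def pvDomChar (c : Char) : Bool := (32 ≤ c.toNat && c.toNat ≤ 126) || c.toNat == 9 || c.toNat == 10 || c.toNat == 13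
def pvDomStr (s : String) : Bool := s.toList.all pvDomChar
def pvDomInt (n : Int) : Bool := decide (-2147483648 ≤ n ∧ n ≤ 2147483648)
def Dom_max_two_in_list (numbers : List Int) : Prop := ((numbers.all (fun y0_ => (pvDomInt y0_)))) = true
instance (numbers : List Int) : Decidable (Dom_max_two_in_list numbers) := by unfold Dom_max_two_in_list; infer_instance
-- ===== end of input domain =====

-- B replaces A's one-pass max1/max2 state machine with two builtin passes (max, then max of the strictly smaller elements); same O(n) cost, simpler code.

-- ===== PORT A =====
-- the for-loop of A: state (max1, max2), branches in A's order
def mtiLoop : List Int → Int → Option Int → Int × Option Int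
  | [], m1, m2 => (m1, m2)
  | x :: xs, m1, m2 =>
    if x > m1 then
      mtiLoop xs x (some m1)
    else if x != m1 && (match m2 with | none => true | some v => decide (x > v)) then
      mtiLoop xs m1 (some x)
    else
      mtiLoop xs m1 m2

def max_two_in_list (numbers : List Int) : Option Int × Option Int :=
  match numbers with
  | [] => (none, none)                 -- if not numbers
  | [x] => (some x, none)              -- if len(numbers) == 1
  | a :: b :: t =>                     -- max1 = numbers[0]; loop over numbers[1:]
    let r := mtiLoop (b :: t) a none
    (some r.1, r.2)

-- ===== PORT B =====
def max_two_in_list_alt (numbers : List Int) : Option Int × Option Int :=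
  match numbers with
  | [] => (none, none)
  | [x] => (some x, none)
  | a :: b :: t =>
    match PySem.List.max? (a :: b :: t) (fun y => y) with   -- m1 = max(numbers)
    | none => (none, none)                                  -- unreachable: list nonempty
    | some m1 =>
      let smaller := (a :: b :: t).filter (fun x => decide (x < m1))
      (some m1, if smaller = [] then none else PySem.List.max? smaller (fun y => y))

-- ===== PRECONDITION & SPEC =====
def Spec_max_two_in_list (numbers : List Int) (out : Option Int × Option Int) : Prop := out = max_two_in_list_alt numbers
instance (numbers : List Int) (out : Option Int × Option Int) : Decidable (Spec_max_two_in_list numbers out) := by unfold Spec_max_two_in_list; infer_instance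

-- ===== CLAIM (what is proved, stated in full; the proofs are below) =====
def Claim_equal_max_two_in_list : Prop := ∀ (numbers : List Int), Dom_max_two_in_list numbers → Spec_max_two_in_list numbers (max_two_in_list numbers)

-- ===== LEMMAS AND PROOFS =====

-- max on Option Int (None = no value yet)
def omax : Option Int → Option Int → Option Int
  | none, b => b
  | some a, none => some a
  | some a, some b => some (max a b)

def smax (l : List Int) : Option Int := l.foldl (fun o x => omax o (some x)) none

theorem omax_none_right (o : Option Int) : omax o none = o := by cases o <;> rfl

theorem omax_assoc (a b c : Option Int) : omax (omax a b) c = omax a (omax b c) := by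
  cases a <;> cases b <;> cases c <;> simp [omax, max_assoc]

theorem omax_comm (a b : Option Int) : omax a b = omax b a := by
  cases a <;> cases b <;> simp [omax, max_comm]

theorem omax_left_comm (a b c : Option Int) : omax a (omax b c) = omax b (omax a c) := by
  rw [← omax_assoc, omax_comm a b, omax_assoc]

theorem foldl_omax (l : List Int) (o : Option Int) :
    l.foldl (fun o x => omax o (some x)) o = omax o (smax l) := by
  induction l generalizing o with
  | nil => rw [List.foldl_nil, show smax [] = none from rfl, omax_none_right]
  | cons x l ih =>
    have h := ih (some x)
    calc List.foldl (fun o x => omax o (some x)) o (x :: l)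
        = List.foldl (fun o x => omax o (some x)) (omax o (some x)) l := by rw [List.foldl_cons]
      _ = omax (omax o (some x)) (smax l) := ih _
      _ = omax o (omax (some x) (smax l)) := omax_assoc ..
      _ = omax o (smax (x :: l)) := by rw [← h]; rfl

theorem smax_cons (x : Int) (l : List Int) : smax (x :: l) = omax (some x) (smax l) := by
  have h := foldl_omax l (some x)
  calc smax (x :: l) = List.foldl (fun o x => omax o (some x)) (some x) l := rfl
    _ = omax (some x) (smax l) := h

theorem smax_cons_foldl (x : Int) (l : List Int) : smax (x :: l) = some (l.foldl max x) := by
  induction l generalizing x with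
  | nil => rfl
  | cons y l ih =>
    simpa [smax, List.foldl_cons, omax] using ih (max x y)

theorem omax_absorb {m2 : Option Int} {k : Int} (h : ∀ v, m2 = some v → v ≤ k) :
    omax m2 (some k) = some k := by
  cases m2 with
  | none => rfl
  | some v => simp [omax, max_eq_right (h v rfl)]

theorem omax_some_exists (a : Int) (s : Option Int) :
    ∃ c, omax (some a) s = some c ∧ a ≤ c := by
  cases s with
  | none => exact ⟨a, rfl, le_refl a⟩
  | some b => exact ⟨max a b, rfl, le_max_left a b⟩

theorem omax_absorb_left {m2 : Option Int} {a : Int} (s : Option Int)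
    (h : ∀ v, m2 = some v → v ≤ a) : omax m2 (omax (some a) s) = omax (some a) s := by
  obtain ⟨c, hc, hac⟩ := omax_some_exists a s
  rw [hc]; exact omax_absorb (fun v hv => le_trans (h v hv) hac)

-- pulling the SECOND element out of a filtered smax
theorem smax_filter_middle (p : Int → Bool) (a x : Int) (l : List Int) :
    smax ((a :: x :: l).filter p) =
      if p x then omax (some x) (smax ((a :: l).filter p)) else smax ((a :: l).filter p) := by
  by_cases hx : p x <;> by_cases ha : p a <;>
    simp [hx, ha, smax_cons, omax_left_comm]

-- a duplicated head contributes nothing to a max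
theorem smax_filter_dup (p : Int → Bool) (a : Int) (l : List Int) :
    smax ((a :: a :: l).filter p) = smax ((a :: l).filter p) := by
  by_cases h : p a
  · simp only [List.filter_cons_of_pos h]
    rw [smax_cons a (a :: List.filter p l), smax_cons a (List.filter p l), ← omax_assoc]
    congr 1
    simp [omax]
  · simp only [List.filter_cons_of_neg h]

-- invariant characterisation of A's loop
theorem mtiLoop_spec (xs : List Int) (m1 : Int) (m2 : Option Int)
    (hinv : ∀ v, m2 = some v → v < m1) :
    mtiLoop xs m1 m2 =
      (xs.foldl max m1,
       omax m2 (smax ((m1 :: xs).filter (fun x => decide (x < xs.foldl max m1))))) := by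
  induction xs generalizing m1 m2 with
  | nil =>
    show (m1, m2) = (m1, omax m2 (smax ([m1].filter (fun x => decide (x < m1)))))
    rw [List.filter_cons_of_neg (by simp), List.filter_nil,
      show smax [] = none from rfl, omax_none_right]
  | cons x xs ih =>
    have hM : (x :: xs).foldl max m1 = xs.foldl max (max m1 x) := by simp
    rw [hM]
    by_cases h1 : x > m1
    · -- x > max1 branch
      have hmx : max m1 x = x := max_eq_right (le_of_lt h1)
      rw [hmx]
      have hm1lt : m1 < xs.foldl max x := lt_of_lt_of_le h1 (PySem.List.le_foldl_max xs x).1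
      have hrec := ih x (some m1) (by intro v hv; cases hv; exact h1)
      simp only [mtiLoop]
      rw [if_pos h1, hrec]
      refine Prod.ext rfl ?_
      show omax (some m1) _ = omax m2 (smax ((m1 :: x :: xs).filter (fun y => decide (y < xs.foldl max x))))
      conv_rhs => rw [List.filter_cons_of_pos (by simpa using hm1lt), smax_cons]
      exact (omax_absorb_left (a := m1) _ (fun v hv => le_of_lt (hinv v hv))).symm
    · have hmx : max m1 x = m1 := max_eq_left (le_of_not_gt h1)
      rw [hmx]
      have hm1M : m1 ≤ xs.foldl max m1 := (PySem.List.le_foldl_max xs m1).1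
      cases m2 with
      | none =>
        by_cases hxm : x = m1
        · -- x equals the running max: else branch, and the duplicate is absorbed
          subst hxm
          have hrec := ih x none (fun v hv => by cases hv)
          simp only [mtiLoop]
          rw [if_neg h1, if_neg (by simp), hrec]
          refine Prod.ext rfl ?_
          show omax none _ = omax none (smax ((x :: x :: xs).filter (fun y => decide (y < xs.foldl max x))))
          rw [smax_filter_dup]
          rfl
        · -- max2 is None and x ≠ max1: max2 := x
          have hxlt : x < m1 := lt_of_le_of_ne (le_of_not_gt h1) hxm
          have hrec := ih m1 (some x) (fun w hw => by cases Option.some.inj hw; exact hxlt)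
          simp only [mtiLoop]
          rw [if_neg h1, if_pos (by simp [hxm]), hrec]
          refine Prod.ext rfl ?_
          show omax (some x) _ = _
          rw [smax_filter_middle, if_pos (by simpa using lt_of_lt_of_le hxlt hm1M)]
          exact (omax_absorb_left (m2 := none) (a := x) _ (fun w hw => by cases hw)).symm
      | some v =>
        have hvm1 : v < m1 := hinv v rfl
        by_cases hxm : x = m1
        · -- again the else branch with a duplicated max
          subst hxm
          have hrec := ih x (some v) (fun w hw => by cases Option.some.inj hw; exact hvm1)
          simp only [mtiLoop]
          rw [if_neg h1, if_neg (by simp), hrec]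
          refine Prod.ext rfl ?_
          show omax (some v) _ = omax (some v) (smax ((x :: x :: xs).filter (fun y => decide (y < xs.foldl max x))))
          rw [smax_filter_dup]
        · have hxlt : x < m1 := lt_of_le_of_ne (le_of_not_gt h1) hxm
          by_cases hxv : x > v
          · -- x beats the current max2: max2 := x
            have hrec := ih m1 (some x) (fun w hw => by cases Option.some.inj hw; exact hxlt)
            simp only [mtiLoop]
            rw [if_neg h1, if_pos (by simp [hxm, hxv]), hrec]
            refine Prod.ext rfl ?_
            show omax (some x) _ = _
            rw [smax_filter_middle, if_pos (by simpa using lt_of_lt_of_le hxlt hm1M)]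
            exact (omax_absorb_left (m2 := some v) (a := x) _ (fun w hw => by cases Option.some.inj hw; exact le_of_lt hxv)).symm
          · -- x ≤ max2: else branch, x is absorbed by v
            have hxv' : x ≤ v := le_of_not_gt hxv
            have hrec := ih m1 (some v) (fun w hw => by cases Option.some.inj hw; exact hvm1)
            simp only [mtiLoop]
            rw [if_neg h1, if_neg (by simp [hxv]), hrec]
            refine Prod.ext rfl ?_
            show omax (some v) _ = _
            rw [smax_filter_middle]
            by_cases hxM : x < xs.foldl max m1
            · rw [if_pos (by simpa using hxM), ← omax_assoc]
              congr 1
              simp [omax, max_eq_left hxv']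
            · rw [if_neg (by simpa using hxM)]

-- ===== VERDICT (by name: the statement is the Claim_ definition above) =====
theorem max_two_in_list_spec : Claim_equal_max_two_in_list := by
  intro numbers _
  unfold Spec_max_two_in_list
  match numbers with
  | [] => rfl
  | [x] => rfl
  | a :: b :: t =>
    have hloop := mtiLoop_spec (b :: t) a none (fun v hv => by cases hv)
    simp only [max_two_in_list, max_two_in_list_alt, PySem.List.max?_id_cons, hloop]
    refine Prod.ext rfl ?_
    rcases hF : (a :: b :: t).filter (fun x => decide (x < List.foldl max a (b :: t))) with _ | ⟨c, d⟩
    · simp [smax, omax]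
    · simp [PySem.List.max?_id_cons, smax_cons_foldl, omax]
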